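-- pv_equiv track=rewrite | github.com/Lynkattu/IOTP | main.py | decodePin
-- ===== SOURCE A (Python) =====
-- def decodePin(recv):
--     pin = ""
--     for i in reversed(range(len(recv))):
--         if recv[i] == ",":
--             break
--         if recv[i] >= "0" and recv[i] <= "9":
--             pin = ''.join((recv[i],pin))
--     return pin
-- ===== SOURCE B (Python) =====
-- def decodePin(recv):
--     tail = recv.rsplit(',', 1)[-1]
--     return ''.join(c for c in tail if '0' <= c <= '9')
-- ===== Notes on version B (the rewrite author's own statement) =====
-- stated objective: simpler
-- what changed: Replaces the single backward index loop with break by a locate-then-filter decomposition: take the segment after the last comma with rsplit and filter it for digit characters.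
import Mathlib
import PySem

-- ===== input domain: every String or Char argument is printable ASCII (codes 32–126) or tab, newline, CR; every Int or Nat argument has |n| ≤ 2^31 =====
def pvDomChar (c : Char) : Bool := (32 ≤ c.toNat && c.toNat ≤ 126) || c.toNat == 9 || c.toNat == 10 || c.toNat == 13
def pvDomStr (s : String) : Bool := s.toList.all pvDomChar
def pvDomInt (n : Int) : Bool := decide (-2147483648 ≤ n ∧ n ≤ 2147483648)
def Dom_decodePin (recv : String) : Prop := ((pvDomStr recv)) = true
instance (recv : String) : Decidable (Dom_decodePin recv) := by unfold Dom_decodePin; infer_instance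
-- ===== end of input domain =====

-- B replaces A's backward loop-with-break by locate-the-last-comma-then-filter-digits; same values, simpler decomposition.
-- ===== PORT A =====
-- digit test `recv[i] >= "0" and recv[i] <= "9"` on a single character
def isDigCh (c : Char) : Bool := decide ('0' ≤ c) && decide (c ≤ '9')

-- the `for i in reversed(range(len(recv)))` loop with its break, walking the reversed chars, pin as accumulator
def aLoop : List Char → List Char → List Char
  | [], pin => pin
  | c :: rest, pin =>
    if c = ',' then pin
    else aLoop rest (if isDigCh c then c :: pin else pin)

def decodePin (recv : String) : String :=
  String.mk (aLoop recv.toList.reverse [])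

-- ===== PORT B =====
def decodePin_alt (recv : String) : String :=
  -- recv.rsplit(',', 1)[-1]: everything after the last comma (whole string if none)
  let tail := (recv.toList.reverse.takeWhile (fun c => c ≠ ',')).reverse
  String.mk (tail.filter isDigCh)

-- ===== PRECONDITION & SPEC =====
def Spec_decodePin (recv : String) (out : String) : Prop := out = decodePin_alt recv
instance (recv : String) (out : String) : Decidable (Spec_decodePin recv out) := by unfold Spec_decodePin; infer_instance

-- ===== CLAIM (what is proved, stated in full; the proofs are below) =====
def Claim_equal_decodePin : Prop := ∀ (recv : String), Dom_decodePin recv → Spec_decodePin recv (decodePin recv)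

-- ===== LEMMAS AND PROOFS =====

-- ===== VERDICT (by name: the statement is the Claim_ definition above) =====
theorem aLoop_eq (l : List Char) : ∀ pin,
    aLoop l pin = ((l.takeWhile (fun c => c ≠ ',')).reverse.filter isDigCh) ++ pin := by
  induction l with
  | nil => intro pin; simp [aLoop]
  | cons c rest ih =>
    intro pin
    by_cases hc : c = ','
    · simp [aLoop, hc, List.takeWhile]
    · by_cases hd : isDigCh c = true <;>
        simp [aLoop, hc, hd, List.takeWhile, ih, List.filter_append]

theorem decodePin_spec : Claim_equal_decodePin := by
  intro recv _
  unfold Spec_decodePin decodePin decodePin_alt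
  rw [aLoop_eq]
  simp
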